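-- pv_equiv track=rewrite | github.com/philippetoso-commits/projet_perso | app_lecture/scripts/appliquer_moulinette_v4.py | corriger_groupes_consonantiques
-- ===== SOURCE A (Python) =====
-- GROUPES_CONSONANTIQUES = [
--     "tr", "pr", "br", "dr", "cr", "fr",
--     "pl", "bl", "gl", "cl"
-- ]
--
-- def corriger_groupes_consonantiques(syllabes):
--     """
--     Évite de couper un groupe naturel (tr, pl, fr…)
--     """
--     i = 0
--     while i < len(syllabes) - 1:
--         fin = syllabes[i][-1] if syllabes[i] else ""
--         debut = syllabes[i + 1][:1]
--
--         cluster = fin + debut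
--         if cluster in GROUPES_CONSONANTIQUES:
--             syllabes[i] += debut
--             syllabes[i + 1] = syllabes[i + 1][1:]
--             if syllabes[i + 1] == "":
--                 del syllabes[i + 1]
--                 continue
--         i += 1
--
--     return syllabes
-- ===== SOURCE B (Python) =====
-- GROUPES_CONSONANTIQUES = [
--     "tr", "pr", "br", "dr", "cr", "fr",
--     "pl", "bl", "gl", "cl"
-- ]
--
-- def corriger_groupes_consonantiques(syllabes):
--     """
--     Évite de couper un groupe naturel (tr, pl, fr…)
--     Single forward scan building a fresh list, written back in place.
--     """
--     out = []
--     for syl in syllabes: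
--         if out and out[-1] and syl and out[-1][-1] + syl[0] in GROUPES_CONSONANTIQUES:
--             out[-1] += syl[0]
--             syl = syl[1:]
--             if not syl:
--                 continue
--         out.append(syl)
--     syllabes[:] = out
--     return syllabes
-- ===== Notes on version B (the rewrite author's own statement) =====
-- stated objective: simpler
-- what changed: Replaces A's index-based while-loop that edits the list in place (with del and continue re-running the same index) by a single forward for-loop folding each syllable onto a fresh output list, merging into its last element.
import Mathlib
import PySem

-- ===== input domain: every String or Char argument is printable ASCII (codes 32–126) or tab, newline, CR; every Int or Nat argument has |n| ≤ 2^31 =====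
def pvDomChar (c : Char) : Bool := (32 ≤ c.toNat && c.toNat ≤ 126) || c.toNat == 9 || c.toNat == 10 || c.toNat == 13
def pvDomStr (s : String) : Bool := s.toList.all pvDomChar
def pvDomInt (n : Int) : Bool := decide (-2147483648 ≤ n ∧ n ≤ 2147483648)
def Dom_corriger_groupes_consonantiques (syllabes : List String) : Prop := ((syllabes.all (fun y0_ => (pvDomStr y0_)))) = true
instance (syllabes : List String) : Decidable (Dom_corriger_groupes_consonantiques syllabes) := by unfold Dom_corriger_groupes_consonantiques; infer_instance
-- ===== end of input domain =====

-- B replaces A's index-juggling while-loop (with in-place edits, del and continue) by a single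
-- forward fold building a fresh output list; same return value, simpler decomposition.
-- A mutates its argument in place (B's Python writes back via syllabes[:]); the equivalence
-- proved here is about the return value.


-- ===== PORT A =====
-- strings are handled on the List Char side (PySem convention); GROUPES_CONSONANTIQUES:
def pvGC : List (List Char) :=
  [['t','r'], ['p','r'], ['b','r'], ['d','r'], ['c','r'], ['f','r'],
   ['p','l'], ['b','l'], ['g','l'], ['c','l']]

-- the while-loop of A, state = (list, i); 'i + 1 < len' is Python's 'i < len(syllabes) - 1'.
-- fuel only bounds the iteration count to make the loop total (each iteration strictly
-- decreases length - i, so length is enough); the body is A's, line for line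
def pvLoopA : Nat → List (List Char) → Nat → List (List Char)
  | 0, sys, _ => sys
  | fuel + 1, sys, i =>
    if i + 1 < sys.length then
      let si := sys.getD i []
      -- fin = syllabes[i][-1] if syllabes[i] else ""
      let fin : List Char := match si.getLast? with | some c => [c] | none => []
      -- debut = syllabes[i+1][:1]
      let debut := (sys.getD (i + 1) []).take 1
      let cluster := fin ++ debut
      if pvGC.contains cluster then
        let sys1 := sys.set i (si ++ debut)                           -- syllabes[i] += debut
        let sys2 := sys1.set (i + 1) ((sys1.getD (i + 1) []).drop 1)  -- syllabes[i+1] = syllabes[i+1][1:]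
        if sys2.getD (i + 1) [] = [] then
          pvLoopA fuel (sys2.eraseIdx (i + 1)) i                      -- del + continue
        else
          pvLoopA fuel sys2 (i + 1)
      else
        pvLoopA fuel sys (i + 1)
    else
      sys

def corriger_groupes_consonantiques (syllabes : List String) : List String :=
  (pvLoopA (syllabes.map String.toList).length (syllabes.map String.toList) 0).map String.ofList

-- ===== PORT B =====
-- one step of B's for-loop: out is the list built so far, syl the incoming syllable
def pvStepB (out : List (List Char)) (syl : List Char) : List (List Char) :=
  let fuse : Bool :=
    -- out and out[-1] and syl and out[-1][-1] + syl[0] in GROUPES_CONSONANTIQUES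
    match (out.getLast?).bind List.getLast?, syl.head? with
    | some a, some c => pvGC.contains [a, c]
    | _, _ => false
  if fuse then
    let out' := out.dropLast ++ [(out.getLast?.getD []) ++ syl.take 1]   -- out[-1] += syl[0]
    let syl' := syl.drop 1                                               -- syl = syl[1:]
    if syl' = [] then out' else out' ++ [syl']
  else
    out ++ [syl]

def corriger_groupes_consonantiques_alt (syllabes : List String) : List String :=
  ((syllabes.map String.toList).foldl pvStepB []).map String.ofList

-- ===== PRECONDITION & SPEC =====
def Spec_corriger_groupes_consonantiques (syllabes : List String) (out : List String) : Prop := out = corriger_groupes_consonantiques_alt syllabes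
instance (syllabes : List String) (out : List String) : Decidable (Spec_corriger_groupes_consonantiques syllabes out) := by unfold Spec_corriger_groupes_consonantiques; infer_instance

-- ===== CLAIM (what is proved, stated in full; the proofs are below) =====
def Claim_equal_corriger_groupes_consonantiques : Prop := ∀ (syllabes : List String), Dom_corriger_groupes_consonantiques syllabes → Spec_corriger_groupes_consonantiques syllabes (corriger_groupes_consonantiques syllabes)

-- ===== LEMMAS AND PROOFS =====

-- A's cluster test (fin + debut in GROUPES) equals B's guarded two-char test
theorem pvFuse_eq (anchor syl : List Char) :
    pvGC.contains ((match anchor.getLast? with | some c => [c] | none => []) ++ syl.take 1)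
      = (match anchor.getLast?, syl.head? with
         | some a, some c => pvGC.contains [a, c]
         | _, _ => false) := by
  cases h : anchor.getLast? <;> cases syl <;> simp [pvGC]

-- mid-list index facts at position pre.length + 1 (used to read A's in-place edits)
theorem pv_getD_mid2 {α : Type} (pre : List α) (x y : α) (l : List α) (d : α) :
    (pre ++ x :: y :: l).getD (pre.length + 1) d = y := by
  simp [List.getD_eq_getElem?_getD]

theorem pv_set_mid2 {α : Type} (pre : List α) (x y : α) (l : List α) (v : α) :
    (pre ++ x :: y :: l).set (pre.length + 1) v = pre ++ x :: v :: l := by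
  induction pre with
  | nil => simp
  | cons a p ihp => simp [ihp]

theorem pv_erase_mid2 {α : Type} (pre : List α) (x y : α) (l : List α) :
    (pre ++ x :: y :: l).eraseIdx (pre.length + 1) = pre ++ x :: l := by
  induction pre with
  | nil => simp
  | cons a p ihp => simp [ihp]

-- one step of B on an accumulator of the form pre ++ [anchor], phrased with A's cluster test
theorem pvStepB_concat (pre : List (List Char)) (anchor syl : List Char) :
    pvStepB (pre ++ [anchor]) syl =
      if pvGC.contains ((match anchor.getLast? with | some c => [c] | none => []) ++ syl.take 1)
      then (if syl.drop 1 = [] then pre ++ [anchor ++ syl.take 1]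
            else pre ++ [anchor ++ syl.take 1] ++ [syl.drop 1])
      else (pre ++ [anchor]) ++ [syl] := by
  rw [pvFuse_eq]
  unfold pvStepB
  simp only [List.getLast?_concat, Option.bind_some, List.dropLast_concat, Option.getD_some]

-- loop invariant: with the processed prefix 'pre' and current anchor at index pre.length,
-- A's remaining loop computes exactly B's fold of the remaining syllables onto pre ++ [anchor]
theorem pvLoopA_eq_foldl (rest : List (List Char)) :
    ∀ (fuel : Nat) (pre : List (List Char)) (anchor : List Char), rest.length < fuel →
      pvLoopA fuel (pre ++ anchor :: rest) pre.length = List.foldl pvStepB (pre ++ [anchor]) rest := by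
  induction rest with
  | nil =>
    rintro (_ | fuel) pre anchor hf
    · omega
    · rw [pvLoopA]
      simp
  | cons syl rest' ih =>
    rintro (_ | fuel) pre anchor hf
    · omega
    have hc : pre.length + 1 < (pre ++ anchor :: syl :: rest').length := by simp
    have hget1 : (pre ++ anchor :: syl :: rest').getD pre.length [] = anchor := by
      simp [List.getD_eq_getElem?_getD]
    have hset1 : ∀ v, (pre ++ anchor :: syl :: rest').set pre.length v = pre ++ v :: syl :: rest' := by
      intro v; simp
    rw [pvLoopA, if_pos hc]
    simp only [hget1, hset1, pv_getD_mid2, pv_set_mid2, pv_erase_mid2, List.foldl_cons,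
      pvStepB_concat]
    by_cases hm : pvGC.contains
        ((match anchor.getLast? with | some c => [c] | none => []) ++ syl.take 1) = true
    · rw [if_pos hm, if_pos hm]
      by_cases hd : syl.drop 1 = []
      · rw [if_pos hd, if_pos hd]
        exact ih fuel pre (anchor ++ syl.take 1) (by simpa using hf)
      · rw [if_neg hd, if_neg hd]
        have h := ih fuel (pre ++ [anchor ++ syl.take 1]) (syl.drop 1) (by simpa using hf)
        simpa using h
    · rw [if_neg hm, if_neg hm]
      have h := ih fuel (pre ++ [anchor]) syl (by simpa using hf)
      simpa using h

theorem corriger_groupes_consonantiques_spec' :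
    ∀ syllabes, corriger_groupes_consonantiques syllabes = corriger_groupes_consonantiques_alt syllabes := by
  intro syllabes
  unfold corriger_groupes_consonantiques corriger_groupes_consonantiques_alt
  cases hs : syllabes.map String.toList with
  | nil => rfl
  | cons s t =>
    have h0 : pvLoopA (s :: t).length (s :: t) 0
        = pvLoopA (s :: t).length (([] : List (List Char)) ++ s :: t) ([] : List (List Char)).length := by simp
    have hb : List.foldl pvStepB [] (s :: t) = List.foldl pvStepB ([] ++ [s]) t := by
      simp [pvStepB]
    rw [h0, pvLoopA_eq_foldl t (s :: t).length [] s (by simp), hb]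

-- ===== VERDICT (by name: the statement is the Claim_ definition above) =====
theorem corriger_groupes_consonantiques_spec : Claim_equal_corriger_groupes_consonantiques := by
  intro syllabes _
  unfold Spec_corriger_groupes_consonantiques
  exact corriger_groupes_consonantiques_spec' syllabes
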